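-- pv_equiv track=rewrite | github.com/KhalidMas23/bananabot | core/solver.py | _hand_without_one
-- ===== SOURCE A (Python) =====
-- def _hand_without_one(hand: list[str], letter: str) -> list[str]:
--     u = letter.upper()
--     out: list[str] = []
--     removed = False
--     for h in hand:
--         if not removed and h.upper() == u:
--             removed = True
--             continue
--         out.append(h.upper())
--     return out
-- ===== SOURCE B (Python) =====
-- def _hand_without_one(hand: list[str], letter: str) -> list[str]:
--     upper = [h.upper() for h in hand]
--     try:
--         i = upper.index(letter.upper())
--     except ValueError:
--         return upper
--     return upper[:i] + upper[i + 1:]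
-- ===== Notes on version B (the rewrite author's own statement) =====
-- stated objective: simpler
-- what changed: Replaces the single-pass removed-flag accumulator loop with a transform-then-find-then-slice decomposition: uppercase the whole hand, locate the first match with list.index, and splice it out with slices.
import Mathlib
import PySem

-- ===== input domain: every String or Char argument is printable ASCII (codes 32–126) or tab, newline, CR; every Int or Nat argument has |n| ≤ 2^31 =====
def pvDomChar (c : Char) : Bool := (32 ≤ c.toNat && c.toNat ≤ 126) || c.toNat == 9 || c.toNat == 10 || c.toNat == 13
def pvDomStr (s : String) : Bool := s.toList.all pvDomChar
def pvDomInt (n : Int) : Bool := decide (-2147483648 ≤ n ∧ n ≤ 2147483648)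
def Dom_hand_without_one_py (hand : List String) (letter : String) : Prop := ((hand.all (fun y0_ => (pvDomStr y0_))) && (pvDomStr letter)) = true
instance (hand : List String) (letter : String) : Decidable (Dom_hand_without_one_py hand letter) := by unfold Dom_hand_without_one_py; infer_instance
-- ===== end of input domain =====

-- B replaces A's removed-flag single-pass loop by uppercase-all, find the first match
-- with index, and splice it out with slices (objective: simpler).

-- ===== PORT A =====
-- the for-loop over `hand` carrying (out, removed), step for step
def hand_without_one_py (hand : List String) (letter : String) : List String :=
  let u := PySem.Str.upper letter
  (hand.foldl (fun (st : List String × Bool) h =>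
      if !st.2 && (PySem.Str.upper h == u) then (st.1, true)
      else (st.1 ++ [PySem.Str.upper h], st.2)) ([], false)).1

-- ===== PORT B =====
def hand_without_one_py_alt (hand : List String) (letter : String) : List String :=
  let upper := hand.map PySem.Str.upper
  match PySem.List.index? upper (PySem.Str.upper letter) with
  | none => upper
  | some i =>
      PySem.List.slice upper none (some (i : Int)) ++
      PySem.List.slice upper (some ((i : Int) + 1)) none

-- ===== PRECONDITION & SPEC =====
def Spec_hand_without_one_py (hand : List String) (letter : String) (out : List String) : Prop := out = hand_without_one_py_alt hand letter
instance (hand : List String) (letter : String) (out : List String) : Decidable (Spec_hand_without_one_py hand letter out) := by unfold Spec_hand_without_one_py; infer_instance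

-- ===== CLAIM (what is proved, stated in full; the proofs are below) =====
def Claim_equal_hand_without_one_py : Prop := ∀ (hand : List String) (letter : String), Dom_hand_without_one_py hand letter → Spec_hand_without_one_py hand letter (hand_without_one_py hand letter)

-- ===== LEMMAS AND PROOFS =====

-- once removed = true the loop only appends the uppercased elements
theorem pv_fold_removed (u : String) (l : List String) (acc : List String) :
    (l.foldl (fun (st : List String × Bool) h =>
      if !st.2 && (PySem.Str.upper h == u) then (st.1, true)
      else (st.1 ++ [PySem.Str.upper h], st.2)) (acc, true)).1
    = acc ++ l.map PySem.Str.upper := by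
  induction l generalizing acc with
  | nil => simp
  | cons h t ih =>
    rw [List.foldl_cons]
    simp only [Bool.not_true, Bool.false_and, Bool.false_eq_true, if_false]
    rw [ih]
    simp

-- main invariant for the removed = false state
theorem pv_fold_main (u : String) (l : List String) (acc : List String) :
    (l.foldl (fun (st : List String × Bool) h =>
      if !st.2 && (PySem.Str.upper h == u) then (st.1, true)
      else (st.1 ++ [PySem.Str.upper h], st.2)) (acc, false)).1
    = acc ++ (match PySem.List.index? (l.map PySem.Str.upper) u with
      | none => l.map PySem.Str.upper
      | some i => (l.map PySem.Str.upper).take i ++ (l.map PySem.Str.upper).drop (i + 1)) := by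
  induction l generalizing acc with
  | nil => simp [PySem.List.index?]
  | cons h t ih =>
    rw [List.foldl_cons, List.map_cons]
    by_cases hu : PySem.Str.upper h = u
    · have hbeq : (PySem.Str.upper h == u) = true := by simp [hu]
      simp only [hbeq, Bool.not_false, Bool.true_and, reduceIte]
      rw [pv_fold_removed, hu, PySem.List.index?_cons_self]
      simp
    · have hne : (PySem.Str.upper h == u) = false := by simp [hu]
      simp only [hne, Bool.not_false, Bool.true_and, Bool.false_eq_true, if_false]
      rw [ih, PySem.List.index?_cons_of_ne _ hu]
      cases hidx : PySem.List.index? (t.map PySem.Str.upper) u with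
      | none => simp
      | some i => simp [List.take_succ_cons, List.drop_succ_cons]

theorem pv_main (hand : List String) (letter : String) :
    hand_without_one_py hand letter = hand_without_one_py_alt hand letter := by
  unfold hand_without_one_py hand_without_one_py_alt
  rw [pv_fold_main]
  cases hidx : PySem.List.index? (hand.map PySem.Str.upper) (PySem.Str.upper letter) with
  | none => simp only [hidx, List.nil_append]
  | some i =>
    simp only [hidx, List.nil_append]
    rw [PySem.List.slice_to_natCast, show ((i : Int) + 1) = ((i + 1 : Nat) : Int) by push_cast; ring,
      PySem.List.slice_from_natCast]

-- ===== VERDICT (by name: the statement is the Claim_ definition above) =====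
theorem hand_without_one_py_spec : Claim_equal_hand_without_one_py := by
  intro hand letter _
  exact pv_main hand letter
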